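-- pv_equiv track=rewrite | github.com/ac1457/UK-retail-food-pricing-scraper | trolley_scraper_fixed.py | _are_brands_similar
-- ===== SOURCE A (Python) =====
-- def _are_brands_similar(brand1: str, brand2: str) -> bool:
--     """Check if two brands are similar variations - STRICT MATCHING"""
--     brand1_lower = brand1.lower().strip()
--     brand2_lower = brand2.lower().strip()
--
--     # Exact match
--     if brand1_lower == brand2_lower:
--         return True
--
--     # Handle ONLY known legitimate variations (very strict)
--     brand_variations = {
--         'alfez': ['al-fez', 'al fez', 'al\'fez'],
--         'al-fez': ['alfez', 'al fez', 'al\'fez'],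
--         'al fez': ['alfez', 'al-fez', 'al\'fez'],
--         'al\'fez': ['alfez', 'al-fez', 'al fez'],
--         'dr. oetker': ['dr oetker', 'oetker'],
--         'dr oetker': ['dr. oetker', 'oetker'],
--         'oetker': ['dr. oetker', 'dr oetker'],
--         'sainsburys': ['sainsbury'],
--         'sainsbury': ['sainsburys'],
--         'wagamama': ['wagamama'],
--         'coca cola': ['coca-cola'],
--         'coca-cola': ['coca cola'],
--     }
--
--     # Check if brands are in the same variation group
--     for main_brand, variations in brand_variations.items():
--         if brand1_lower == main_brand and brand2_lower in variations:
--             return True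
--         if brand2_lower == main_brand and brand1_lower in variations:
--             return True
--         if brand1_lower in variations and brand2_lower in variations:
--             return True
--
--     # For all other cases - brands are NOT similar
--     return False
-- ===== SOURCE B (Python) =====
-- _BRAND_GROUPS = [
--     frozenset({"alfez", "al-fez", "al fez", "al'fez"}),
--     frozenset({"dr. oetker", "dr oetker", "oetker"}),
--     frozenset({"sainsburys", "sainsbury"}),
--     frozenset({"coca cola", "coca-cola"}),
-- ]
--
-- def _are_brands_similar(brand1: str, brand2: str) -> bool:
--     a = brand1.lower().strip()
--     b = brand2.lower().strip()
--     return a == b or any(a in g and b in g for g in _BRAND_GROUPS)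
-- ===== Notes on version B (the rewrite author's own statement) =====
-- stated objective: simpler
-- what changed: Replaced the directed key->variation-list dict and its three per-entry branch tests with a list of complete equivalence groups and a single same-group membership test.
import Mathlib
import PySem

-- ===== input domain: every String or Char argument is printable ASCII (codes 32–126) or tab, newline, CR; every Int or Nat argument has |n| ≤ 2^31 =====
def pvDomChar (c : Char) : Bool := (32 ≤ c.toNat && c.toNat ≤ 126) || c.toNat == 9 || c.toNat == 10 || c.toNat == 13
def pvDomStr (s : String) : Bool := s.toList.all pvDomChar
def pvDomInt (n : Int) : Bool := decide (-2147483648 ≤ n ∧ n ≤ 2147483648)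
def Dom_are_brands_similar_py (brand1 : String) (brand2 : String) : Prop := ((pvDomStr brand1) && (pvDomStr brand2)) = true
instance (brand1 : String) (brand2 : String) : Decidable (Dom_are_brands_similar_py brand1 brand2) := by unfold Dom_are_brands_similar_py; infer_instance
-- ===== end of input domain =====

-- B replaces A's directed key->variation-list table (three branch tests per entry)
-- with complete equivalence groups and a single same-group membership test (simpler).


-- ===== PORT A =====
def brandVariations : List (String × List String) :=
  [("alfez", ["al-fez", "al fez", "al'fez"]),
   ("al-fez", ["alfez", "al fez", "al'fez"]),
   ("al fez", ["alfez", "al-fez", "al'fez"]),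
   ("al'fez", ["alfez", "al-fez", "al fez"]),
   ("dr. oetker", ["dr oetker", "oetker"]),
   ("dr oetker", ["dr. oetker", "oetker"]),
   ("oetker", ["dr. oetker", "dr oetker"]),
   ("sainsburys", ["sainsbury"]),
   ("sainsbury", ["sainsburys"]),
   ("wagamama", ["wagamama"]),
   ("coca cola", ["coca-cola"]),
   ("coca-cola", ["coca cola"])]

-- the for-loop over the dict items with its three early returns
def brandLoopA (a b : String) : List (String × List String) → Bool
  | [] => false
  | (k, vs) :: rest =>
    if a == k && vs.contains b then true
    else if b == k && vs.contains a then true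
    else if vs.contains a && vs.contains b then true
    else brandLoopA a b rest

def are_brands_similar_py (brand1 : String) (brand2 : String) : Bool :=
  let brand1_lower := PySem.Str.strip (PySem.Str.lower brand1)
  let brand2_lower := PySem.Str.strip (PySem.Str.lower brand2)
  if brand1_lower == brand2_lower then true
  else brandLoopA brand1_lower brand2_lower brandVariations

-- ===== PORT B =====
def brandGroups : List (List String) :=
  [["alfez", "al-fez", "al fez", "al'fez"],
   ["dr. oetker", "dr oetker", "oetker"],
   ["sainsburys", "sainsbury"],
   ["coca cola", "coca-cola"]]

def are_brands_similar_py_alt (brand1 : String) (brand2 : String) : Bool :=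
  let a := PySem.Str.strip (PySem.Str.lower brand1)
  let b := PySem.Str.strip (PySem.Str.lower brand2)
  a == b || brandGroups.any (fun g => g.contains a && g.contains b)

-- ===== PRECONDITION & SPEC =====
def Spec_are_brands_similar_py (brand1 : String) (brand2 : String) (out : Bool) : Prop := out = are_brands_similar_py_alt brand1 brand2
instance (brand1 : String) (brand2 : String) (out : Bool) : Decidable (Spec_are_brands_similar_py brand1 brand2 out) := by unfold Spec_are_brands_similar_py; infer_instance

-- ===== CLAIM (what is proved, stated in full; the proofs are below) =====
def Claim_equal_are_brands_similar_py : Prop := ∀ (brand1 : String) (brand2 : String), Dom_are_brands_similar_py brand1 brand2 → Spec_are_brands_similar_py brand1 brand2 (are_brands_similar_py brand1 brand2)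

-- ===== LEMMAS AND PROOFS =====
def allBrands : List String :=
  ["alfez", "al-fez", "al fez", "al'fez", "dr. oetker", "dr oetker", "oetker",
   "sainsburys", "sainsbury", "wagamama", "coca cola", "coca-cola"]

-- the heart: on normalized strings, A's loop-with-early-return agrees with B's same-group test
theorem brand_core (a b : String) :
    (if a == b then true else brandLoopA a b brandVariations)
      = (a == b || brandGroups.any (fun g => g.contains a && g.contains b)) := by
  by_cases ha : a ∈ allBrands
  · by_cases hb : b ∈ allBrands
    · fin_cases ha <;> fin_cases hb <;> decide
    · simp only [allBrands, List.mem_cons, List.not_mem_nil, or_false, not_or] at hb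
      obtain ⟨h1, h2, h3, h4, h5, h6, h7, h8, h9, h10, h11, h12⟩ := hb
      simp [brandLoopA, brandVariations, brandGroups, h1, h2, h3, h4, h5, h6, h7, h8, h9,
        h10, h11, h12]
      exact (beq_eq_decide a b).symm
  · simp only [allBrands, List.mem_cons, List.not_mem_nil, or_false, not_or] at ha
    obtain ⟨h1, h2, h3, h4, h5, h6, h7, h8, h9, h10, h11, h12⟩ := ha
    simp [brandLoopA, brandVariations, brandGroups, h1, h2, h3, h4, h5, h6, h7, h8, h9,
      h10, h11, h12]
    exact (beq_eq_decide a b).symm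

-- ===== VERDICT (by name: the statement is the Claim_ definition above) =====
theorem are_brands_similar_py_spec : Claim_equal_are_brands_similar_py := by
  intro brand1 brand2 _
  unfold Spec_are_brands_similar_py are_brands_similar_py are_brands_similar_py_alt
  exact brand_core _ _
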